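-- pv_equiv track=rewrite | github.com/cristianiniguez/curso_estadistica_computacional_python | simulaciones_montecarlo/barajas.py | contar_poquers
-- ===== SOURCE A (Python) =====
-- import collections
--
-- def obtener_conteo_valores(mano):
--     valores = []
--     for carta in mano:
--         valores.append(carta[1])
--     counter = dict(collections.Counter(valores))
--     return counter
--
-- def contar_poquers(manos):
--     poquers = 0
--     for mano in manos:
--         conteo_valores = obtener_conteo_valores(mano)
--         for val in conteo_valores.values():
--             if val == 4:
--                 poquers += 1
--                 break
--     return poquers
-- ===== SOURCE B (Python) =====
-- def contar_poquers(manos):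
--     poquers = 0
--     for mano in manos:
--         # sort the card values, then scan runs of equal consecutive values
--         vs = sorted([carta[1] for carta in mano])
--         while vs:
--             run = 1
--             while run < len(vs) and vs[run] == vs[0]:
--                 run += 1
--             if run == 4:
--                 poquers += 1
--                 break
--             vs = vs[run:]
--     return poquers
-- ===== Notes on version B (the rewrite author's own statement) =====
-- stated objective: alternative
-- what changed: Replaces the Counter frequency dictionary with a sort-then-scan: B sorts each hand's values and walks the sorted list counting runs of equal consecutive values, counting the hand when a run has length exactly 4.
import Mathlib
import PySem

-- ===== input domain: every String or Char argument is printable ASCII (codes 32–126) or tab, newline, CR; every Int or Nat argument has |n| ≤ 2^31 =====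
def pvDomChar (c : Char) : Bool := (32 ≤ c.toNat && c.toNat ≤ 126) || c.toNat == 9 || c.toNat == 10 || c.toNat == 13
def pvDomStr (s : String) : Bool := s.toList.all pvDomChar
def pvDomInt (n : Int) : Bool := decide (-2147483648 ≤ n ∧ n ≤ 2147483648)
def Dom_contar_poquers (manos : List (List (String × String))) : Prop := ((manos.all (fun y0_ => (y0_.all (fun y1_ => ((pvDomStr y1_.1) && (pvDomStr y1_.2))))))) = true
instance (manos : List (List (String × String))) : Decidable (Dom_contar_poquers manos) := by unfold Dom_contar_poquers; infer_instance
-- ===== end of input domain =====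

-- B replaces A's Counter frequency dictionary with a sort-then-scan of runs of equal consecutive values.
-- ===== PORT A =====
def obtener_conteo_valores (mano : List (String × String)) : PySem.Dict String Int :=
  let valores := mano.foldl (fun acc carta => acc ++ [carta.2]) []
  PySem.Dict.counter valores

-- the inner 'for val in …: if val == 4: poquers += 1; break' loop
def pvLoopVals : List Int → Bool
  | [] => false
  | v :: rest => if v == 4 then true else pvLoopVals rest

def contar_poquers (manos : List (List (String × String))) : Int :=
  manos.foldl (fun poquers mano =>
    let conteo_valores := obtener_conteo_valores mano
    if pvLoopVals conteo_valores.values then poquers + 1 else poquers) 0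

-- ===== PORT B =====
-- Source B's 'while vs: …' scan over the sorted values: the inner while counts the
-- leading run (comparisons against vs[0], i.e. takeWhile on the tail), then
-- either breaks on run == 4 or continues on vs[run:] (= drop run).
def pvTienePoquer : List String → Bool
  | [] => false
  | v :: rest =>
    let run := 1 + (rest.takeWhile (fun x => x == v)).length
    if run == 4 then true
    else pvTienePoquer ((v :: rest).drop run)
termination_by l => l.length
decreasing_by
  simp only [List.length_drop, List.length_cons]
  omega

def contar_poquers_alt (manos : List (List (String × String))) : Int :=
  manos.foldl (fun poquers mano =>
    let vs := PySem.List.sorted (mano.map (fun carta => carta.2)) (fun x => x) false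
    if pvTienePoquer vs then poquers + 1 else poquers) 0

-- ===== PRECONDITION & SPEC =====
def Spec_contar_poquers (manos : List (List (String × String))) (out : Int) : Prop := out = contar_poquers_alt manos
instance (manos : List (List (String × String))) (out : Int) : Decidable (Spec_contar_poquers manos out) := by unfold Spec_contar_poquers; infer_instance

-- ===== CLAIM (what is proved, stated in full; the proofs are below) =====
def Claim_equal_contar_poquers : Prop := ∀ (manos : List (List (String × String))), Dom_contar_poquers manos → Spec_contar_poquers manos (contar_poquers manos)

-- ===== LEMMAS AND PROOFS =====

lemma pvLoopVals_eq_any (l : List Int) : pvLoopVals l = l.any (fun v => v == 4) := by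
  induction l with
  | nil => rfl
  | cons v rest ih => by_cases h : v = 4 <;> simp [pvLoopVals, h, ih]

-- A's per-hand test: some value occurs exactly 4 times
lemma a_hand_iff (mano : List (String × String)) :
    pvLoopVals (obtener_conteo_valores mano).values = true
      ↔ ∃ v, (mano.map (fun carta => carta.2)).count v = 4 := by
  set xs := mano.map (fun carta => carta.2) with hxs
  have hval : (obtener_conteo_valores mano).values
      = (PySem.Set.ofList xs).map (fun k => (xs.count k : Int)) := by
    have hflat : (List.map (fun x2 => ([x2.2] : List String)) mano).flatten = xs := by
      rw [hxs]; induction mano with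
      | nil => rfl
      | cons c rest ih => simp [ih]
    simp [obtener_conteo_valores,
      PySem.Dict.values, PySem.Dict.items_counter, hflat, List.map_map, Function.comp]
  rw [hval, pvLoopVals_eq_any]
  simp only [List.any_eq_true, List.mem_map, PySem.Set.mem_ofList, beq_iff_eq]
  constructor
  · rintro ⟨_, ⟨k, hk, rfl⟩, h4⟩
    exact ⟨k, by exact_mod_cast h4⟩
  · rintro ⟨v, h4⟩
    have hv : v ∈ xs := by
      have : 0 < xs.count v := by omega
      exact List.count_pos_iff.mp this
    exact ⟨(xs.count v : Int), ⟨v, hv, rfl⟩, by exact_mod_cast h4⟩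

-- B's scan on a sorted list finds a run of length 4 iff some value has count 4
lemma run_lemma (n : Nat) : ∀ s : List String, s.length ≤ n → s.Pairwise (· ≤ ·) →
    (pvTienePoquer s = true ↔ ∃ v, s.count v = 4) := by
  induction n with
  | zero =>
    intro s hs _
    have : s = [] := List.eq_nil_of_length_eq_zero (Nat.le_zero.mp hs)
    subst this
    simp [pvTienePoquer]
  | succ n ih =>
    intro s hlen hsort
    cases s with
    | nil => simp [pvTienePoquer]
    | cons v rest =>
      set t := rest.takeWhile (fun x => x == v) with ht
      set d := rest.dropWhile (fun x => x == v) with hd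
      have hrest : rest = t ++ d := (List.takeWhile_append_dropWhile).symm
      have htv : ∀ x ∈ t, x = v := by
        intro x hx
        have := List.mem_takeWhile_imp hx
        simpa using this
      have hvd : v ∉ d := by
        intro hvmem
        cases hdc : d with
        | nil => simp [hdc] at hvmem
        | cons h d' =>
          have hhne : h ≠ v := by
            have := List.head?_dropWhile_not (fun x => x == v) rest
            rw [← hd, hdc] at this
            simpa using this
          have hvle : ∀ x ∈ rest, v ≤ x := (List.pairwise_cons.mp hsort).1
          have hvh : v ≤ h := hvle h (by rw [hrest, hdc]; simp)
          have hdsort : d.Pairwise (· ≤ ·) := by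
            have : rest.Pairwise (· ≤ ·) := (List.pairwise_cons.mp hsort).2
            rw [hrest] at this
            exact (List.pairwise_append.mp this).2.1
          rw [hdc] at hvmem hdsort
          rcases List.mem_cons.mp hvmem with h1 | h1
          · exact hhne h1.symm
          · have : h ≤ v := (List.pairwise_cons.mp hdsort).1 v h1
            exact hhne (le_antisymm this hvh)
      have hcvd : d.count v = 0 := List.count_eq_zero.mpr hvd
      have hcvt : t.count v = t.length := by
        rw [List.count_eq_length]
        intro b hb; exact (htv b hb).symm
      have hcnt : ∀ u : String, u ≠ v → (v :: rest).count u = d.count u := by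
        intro u hu
        have hct : t.count u = 0 := by
          rw [List.count_eq_zero]
          intro hmem
          exact hu (htv u hmem)
        rw [hrest, List.count_cons, List.count_append, hct]
        simp [Ne.symm hu]
      have hcv : (v :: rest).count v = 1 + t.length := by
        rw [hrest, List.count_cons, List.count_append, hcvt, hcvd]
        simp [Nat.add_comm]
      have hdrop : (v :: rest).drop (1 + t.length) = d := by
        have h1 : (1 + t.length) = t.length + 1 := Nat.add_comm _ _
        rw [h1, List.drop_succ_cons, hrest, List.drop_left]
      have hdsort : d.Pairwise (· ≤ ·) := by
        have : rest.Pairwise (· ≤ ·) := (List.pairwise_cons.mp hsort).2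
        rw [hrest] at this
        exact (List.pairwise_append.mp this).2.1
      have hdlen : d.length ≤ n := by
        have h1 : t.length + d.length = rest.length := by
          rw [hrest, List.length_append]
        have h2 : rest.length + 1 ≤ n + 1 := by simpa using hlen
        omega
      rw [pvTienePoquer]
      simp only [← ht, hdrop]
      by_cases h4 : 1 + t.length = 4
      · rw [if_pos (by simp [h4])]
        constructor
        · intro _
          exact ⟨v, by rw [hcv, h4]⟩
        · intro _; rfl
      · rw [if_neg (by simp [h4])]
        rw [ih d hdlen hdsort]
        constructor
        · rintro ⟨u, hu⟩
          have hune : u ≠ v := by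
            intro h; subst h; rw [hcvd] at hu; omega
          exact ⟨u, by rw [hcnt u hune]; exact hu⟩
        · rintro ⟨u, hu⟩
          have hune : u ≠ v := by
            intro h; subst h; rw [hcv] at hu; omega
          exact ⟨u, by rw [← hcnt u hune]; exact hu⟩

lemma b_hand_iff (mano : List (String × String)) :
    pvTienePoquer (PySem.List.sorted (mano.map (fun carta => carta.2)) (fun x => x) false) = true
      ↔ ∃ v, (mano.map (fun carta => carta.2)).count v = 4 := by
  set xs := mano.map (fun carta => carta.2)
  set s := PySem.List.sorted xs (fun x => x) false with hs
  have hperm : s.Perm xs := PySem.List.sorted_perm xs (fun x => x) false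
  have hsort : s.Pairwise (· ≤ ·) := by
    have := PySem.List.sorted_pairwise xs (fun x => x)
    simpa using this
  rw [run_lemma s.length s le_rfl hsort]
  constructor
  · rintro ⟨v, hv⟩; exact ⟨v, by rw [← hperm.count_eq]; exact hv⟩
  · rintro ⟨v, hv⟩; exact ⟨v, by rw [hperm.count_eq]; exact hv⟩

-- ===== VERDICT (by name: the statement is the Claim_ definition above) =====
theorem contar_poquers_spec : Claim_equal_contar_poquers := by
  intro manos _
  unfold Spec_contar_poquers contar_poquers contar_poquers_alt
  congr 1
  funext poquers mano
  have : pvLoopVals (obtener_conteo_valores mano).values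
      = pvTienePoquer (PySem.List.sorted (mano.map (fun carta => carta.2)) (fun x => x) false) := by
    rw [Bool.eq_iff_iff, a_hand_iff, b_hand_iff]
  simp only [this]
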